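-- pv_equiv track=rewrite | github.com/markusmkim/RL-PegSolitaire | SimWorld/peg_board.py | create_triangle_grid
-- ===== SOURCE A (Python) =====
-- def create_triangle_grid(size, empty_nodes):
--     grid = []
--     for i in range(size):
--         row = []
--         for j in range(i + 1):
--             if [i, j] in empty_nodes:
--                 row.append(0)
--             else:
--                 row.append(1)
--         grid.append(row)
--     return grid
-- ===== SOURCE B (Python) =====
-- def create_triangle_grid(size, empty_nodes):
--     grid = [[1] * (i + 1) for i in range(size)]
--     for node in empty_nodes:
--         if isinstance(node, list) and len(node) == 2:
--             i, j = node
--             if 0 <= i < size and 0 <= j <= i: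
--                 grid[i][j] = 0
--     return grid
-- ===== Notes on version B (the rewrite author's own statement) =====
-- stated objective: faster
-- what changed: Instead of testing [i,j] membership in empty_nodes for every cell (a scan of empty_nodes per cell), B builds the full triangle of 1s and then makes one pass over empty_nodes zeroing each in-range cell.
import Mathlib
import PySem

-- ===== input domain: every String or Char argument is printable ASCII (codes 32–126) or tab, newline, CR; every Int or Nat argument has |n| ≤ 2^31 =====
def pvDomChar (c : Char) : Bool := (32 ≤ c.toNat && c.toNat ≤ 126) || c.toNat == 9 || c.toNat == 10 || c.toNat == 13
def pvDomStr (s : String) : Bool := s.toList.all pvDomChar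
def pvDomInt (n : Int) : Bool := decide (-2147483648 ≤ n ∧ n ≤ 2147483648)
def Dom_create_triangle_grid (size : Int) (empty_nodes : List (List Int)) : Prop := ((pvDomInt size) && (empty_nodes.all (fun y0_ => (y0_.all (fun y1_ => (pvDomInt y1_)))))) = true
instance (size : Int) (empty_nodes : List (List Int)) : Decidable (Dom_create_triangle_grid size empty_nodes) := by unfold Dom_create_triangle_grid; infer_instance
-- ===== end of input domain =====

-- B replaces A's per-cell membership scan of empty_nodes by building the triangle of 1s
-- and zeroing the in-range empty cells in one separate pass (objective: faster).

-- ===== PORT A =====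
def create_triangle_grid (size : Int) (empty_nodes : List (List Int)) : List (List Int) :=
  (PySem.List.pyRange 0 size 1).foldl (fun grid i =>
    grid ++ [(PySem.List.pyRange 0 (i + 1) 1).foldl (fun row j =>
      row ++ [if [i, j] ∈ empty_nodes then (0 : Int) else 1]) []]) []

-- ===== PORT B =====
-- loop body of B's marking pass ('if isinstance(node, list) and len(node) == 2: …')
def pvMark (size : Int) (g : List (List Int)) (node : List Int) : List (List Int) :=
  match node with
  | [i, j] =>
    if 0 ≤ i ∧ i < size ∧ 0 ≤ j ∧ j ≤ i then
      PySem.List.pySetD g i (PySem.List.pySetD (PySem.List.pyGetD g i []) j 0)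
    else g
  | _ => g

def create_triangle_grid_alt (size : Int) (empty_nodes : List (List Int)) : List (List Int) :=
  let grid := (PySem.List.pyRange 0 size 1).map (fun i => List.replicate (i + 1).toNat (1 : Int))
  empty_nodes.foldl (pvMark size) grid

-- ===== PRECONDITION & SPEC =====
def Spec_create_triangle_grid (size : Int) (empty_nodes : List (List Int)) (out : List (List Int)) : Prop := out = create_triangle_grid_alt size empty_nodes
instance (size : Int) (empty_nodes : List (List Int)) (out : List (List Int)) : Decidable (Spec_create_triangle_grid size empty_nodes out) := by unfold Spec_create_triangle_grid; infer_instance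

-- ===== CLAIM (what is proved, stated in full; the proofs are below) =====
def Claim_equal_create_triangle_grid : Prop := ∀ (size : Int) (empty_nodes : List (List Int)), Dom_create_triangle_grid size empty_nodes → Spec_create_triangle_grid size empty_nodes (create_triangle_grid size empty_nodes)

-- ===== LEMMAS AND PROOFS =====

-- cell access with a junk default (only used in bounds)
def pvCell (g : List (List Int)) (a b : Nat) : Int := (g.getD a []).getD b 0

lemma pvGetD_set_self {α : Type} (l : List α) (n : Nat) (x d : α) (h : n < l.length) :
    (l.set n x).getD n d = x := by
  rw [List.getD_eq_getElem?_getD, List.getElem?_set_self (by simpa using h)]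
  rfl

lemma pvGetD_set_ne {α : Type} (l : List α) (m n : Nat) (x d : α) (h : m ≠ n) :
    (l.set n x).getD m d = l.getD m d := by
  rw [List.getD_eq_getElem?_getD, List.getElem?_set_ne (fun he => h he.symm),
    ← List.getD_eq_getElem?_getD]

-- A's value as a canonical nested map
lemma pvA_eq (size : Int) (empty_nodes : List (List Int)) :
    create_triangle_grid size empty_nodes =
      (List.range size.toNat).map (fun a : Nat =>
        (List.range (a + 1)).map (fun b : Nat =>
          if [(a : Int), (b : Int)] ∈ empty_nodes then (0 : Int) else 1)) := by
  unfold create_triangle_grid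
  rw [PySem.List.pyRange_one 0 size]
  simp only [PySem.List.foldl_append_singleton_eq_map, List.map_map, List.nil_append, Int.sub_zero]
  apply List.map_congr_left
  intro a _
  simp only [Function.comp_apply, zero_add]
  rw [PySem.List.pyRange_one 0 _]
  simp only [List.map_map]
  have h1 : ((a : Int) + 1 - 0).toNat = a + 1 := by omega
  rw [h1]
  apply List.map_congr_left
  intro b _
  simp

-- the marking pass, characterised cell-by-cell under the triangle shape invariant
lemma pvMark_foldl_spec (size : Int) (nodes : List (List Int)) :
    ∀ g : List (List Int), g.length = size.toNat →
      (∀ a, a < g.length → (g.getD a []).length = a + 1) →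
      (nodes.foldl (pvMark size) g).length = g.length ∧
      (∀ a, a < g.length → ((nodes.foldl (pvMark size) g).getD a []).length = a + 1) ∧
      (∀ a b, a < g.length → b ≤ a →
        pvCell (nodes.foldl (pvMark size) g) a b =
          if [(a : Int), (b : Int)] ∈ nodes then 0 else pvCell g a b) := by
  induction nodes with
  | nil => intro g hlen hrow; exact ⟨rfl, hrow, fun a b _ _ => by simp⟩
  | cons n ns ih =>
    intro g hlen hrow
    have hstep : (pvMark size g n).length = g.length ∧
        (∀ a, a < g.length → ((pvMark size g n).getD a []).length = a + 1) ∧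
        (∀ a b, a < g.length → b ≤ a →
          pvCell (pvMark size g n) a b =
            if n = [(a : Int), (b : Int)] then 0 else pvCell g a b) := by
      match n with
      | [] => refine ⟨rfl, hrow, fun a b _ _ => ?_⟩; simp [pvMark]
      | [_] => refine ⟨rfl, hrow, fun a b _ _ => ?_⟩; simp [pvMark]
      | (_ :: _ :: _ :: _) => refine ⟨rfl, hrow, fun a b _ _ => ?_⟩; simp [pvMark]
      | [i, j] =>
        by_cases hv : 0 ≤ i ∧ i < size ∧ 0 ≤ j ∧ j ≤ i
        · have hi : i.toNat < g.length := by omega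
          have hj : j.toNat < (g.getD i.toNat []).length := by
            rw [hrow i.toNat hi]; omega
          have hm : pvMark size g [i, j] =
              g.set i.toNat ((g.getD i.toNat []).set j.toNat 0) := by
            simp only [pvMark]
            rw [if_pos hv]
            rw [PySem.List.pyGetD_eq_getElem g [] hv.1 (by omega)]
            rw [PySem.List.pySetD_of_nonneg _ _ hv.2.2.1, PySem.List.pySetD_of_nonneg _ _ hv.1]
            rw [List.getD_eq_getElem _ _ hi]
          refine ⟨by rw [hm]; simp, ?_, ?_⟩
          · intro a ha
            rw [hm]
            by_cases hai : a = i.toNat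
            · rw [hai, pvGetD_set_self _ _ _ _ hi, List.length_set, hrow i.toNat hi]
            · rw [pvGetD_set_ne _ _ _ _ _ hai]
              exact hrow a ha
          · intro a b ha hb
            rw [hm]
            unfold pvCell
            by_cases hai : a = i.toNat
            · rw [hai, pvGetD_set_self _ _ _ _ hi]
              by_cases hbj : b = j.toNat
              · rw [hbj, pvGetD_set_self _ _ _ _ hj]
                have heq : [i, j] = [(i.toNat : Int), (j.toNat : Int)] := by
                  simp only [List.cons.injEq, and_true]
                  exact ⟨by omega, by omega⟩
                rw [if_pos heq]
              · rw [pvGetD_set_ne _ _ _ _ _ hbj]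
                have hne : ¬ ([i, j] = [(i.toNat : Int), (b : Int)]) := by
                  intro h
                  injection h with h1 h2
                  injection h2 with h2 _
                  omega
                rw [if_neg hne]
            · rw [pvGetD_set_ne _ _ _ _ _ hai]
              have hne : ¬ ([i, j] = [(a : Int), (b : Int)]) := by
                intro h
                injection h with h1 _
                omega
              rw [if_neg hne]
        · have hm : pvMark size g [i, j] = g := by simp [pvMark, hv]
          refine ⟨by rw [hm], by rw [hm]; exact hrow, ?_⟩
          intro a b ha hb
          rw [hm]
          have hne : ¬ ([i, j] = [(a : Int), (b : Int)]) := by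
            intro h
            injection h with h1 h2
            injection h2 with h2 _
            subst h1; subst h2
            have hlt : (a : Int) < size := by omega
            exact hv ⟨by positivity, hlt, by positivity, by exact_mod_cast hb⟩
          rw [if_neg hne]
    obtain ⟨hl, hr, hc⟩ := hstep
    have ih' := ih (pvMark size g n) (hl.trans hlen) (fun a ha => hr a (hl ▸ ha))
    refine ⟨ih'.1.trans hl, fun a ha => ih'.2.1 a (hl ▸ ha), ?_⟩
    intro a b ha hb
    simp only [List.foldl_cons]
    rw [ih'.2.2 a b (hl ▸ ha) hb, hc a b ha hb]
    by_cases h1 : [(a : Int), (b : Int)] ∈ ns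
    · simp [h1]
    · by_cases h2 : n = [(a : Int), (b : Int)] <;> simp [h1, h2, List.mem_cons, eq_comm]

lemma pvInit_get (size : Int) (a : Nat) (ha : a < size.toNat) :
    (((PySem.List.pyRange 0 size 1).map (fun i => List.replicate (i + 1).toNat (1 : Int))).getD a []) =
      List.replicate (a + 1) (1 : Int) := by
  rw [PySem.List.pyRange_one, List.map_map, List.getD_eq_getElem _ _ (by simp; omega)]
  simp only [List.getElem_map, List.getElem_range, Function.comp_apply, zero_add]
  have h2 : ((a : Int) + 1).toNat = a + 1 := by omega
  rw [h2]

-- ===== VERDICT (by name: the statement is the Claim_ definition above) =====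
theorem create_triangle_grid_spec : Claim_equal_create_triangle_grid := by
  intro size empty_nodes _
  unfold Spec_create_triangle_grid
  have halt : create_triangle_grid_alt size empty_nodes =
      empty_nodes.foldl (pvMark size)
        ((PySem.List.pyRange 0 size 1).map (fun i => List.replicate (i + 1).toNat (1 : Int))) := rfl
  rw [pvA_eq, halt]
  have hl0 : ((PySem.List.pyRange 0 size 1).map (fun i => List.replicate (i + 1).toNat (1 : Int))).length = size.toNat := by
    simp
  have hr0 : ∀ a, a < ((PySem.List.pyRange 0 size 1).map (fun i => List.replicate (i + 1).toNat (1 : Int))).length →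
      ((((PySem.List.pyRange 0 size 1).map (fun i => List.replicate (i + 1).toNat (1 : Int))).getD a []).length = a + 1) := by
    intro a ha
    rw [pvInit_get size a (by omega)]
    simp
  obtain ⟨hl, hr, hc⟩ := pvMark_foldl_spec size empty_nodes _ hl0 hr0
  apply List.ext_getElem
  · simp [hl, hl0]
  · intro a h1 h2
    apply List.ext_getElem
    · have hrl := hr a (by omega)
      rw [List.getD_eq_getElem _ _ h2] at hrl
      simp [hrl]
    · intro b hb1 hb2
      have ha : a < size.toNat := by simpa using h1
      have hble : b ≤ a := by simp at hb1; omega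
      have hcc := hc a b (by omega) hble
      unfold pvCell at hcc
      rw [pvInit_get size a ha] at hcc
      rw [List.getD_eq_getElem _ _ h2, List.getD_eq_getElem _ _ hb2] at hcc
      rw [List.getD_eq_getElem _ _ (by simp; omega)] at hcc
      rw [hcc]
      simp
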